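-- pv_equiv track=rewrite | github.com/himanshu-cloudsufi/stdf-agents | scripts/query_curves.py | search
-- ===== SOURCE A (Python) =====
-- def normalize(text: str) -> str:
--     """Lowercase, replace hyphens/underscores with spaces, collapse whitespace."""
--     return text.lower().replace('-', ' ').replace('_', ' ').strip()
--
-- def search(entries, query: str):
--     """Score entries by token match count against dataset_name + description."""
--     tokens = normalize(query).split()
--     if not tokens:
--         return entries
--
--     scored = []
--     for entry in entries:
--         text = normalize(
--             f"{entry.get('dataset_name', '')} {entry.get('description', '')}"
--         )
--         hits = sum(1 for t in tokens if t in text)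
--         if hits > 0:
--             scored.append((hits, entry))
--     scored.sort(key=lambda x: -x[0])
--     return [e for _, e in scored]
-- ===== SOURCE B (Python) =====
-- def normalize(text: str) -> str:
--     return text.lower().replace('-', ' ').replace('_', ' ').strip()
--
-- def search(entries, query: str):
--     """Bucket (counting-sort) variant: group matching entries by hit count, emit high-to-low."""
--     tokens = normalize(query).split()
--     if not tokens:
--         return entries
--     n = len(tokens)
--     buckets = {}
--     for entry in entries:
--         text = normalize(
--             f"{entry.get('dataset_name', '')} {entry.get('description', '')}"
--         )
--         hits = 0
--         for t in tokens:
--             if t in text: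
--                 hits += 1
--         if hits != 0:
--             buckets.setdefault(hits, []).append(entry)
--     result = []
--     for s in range(n, 0, -1):
--         result += buckets.get(s, [])
--     return result
-- ===== Notes on version B (the rewrite author's own statement) =====
-- stated objective: alternative
-- what changed: Replaces A's collect-tuples-then-stable-sort with a one-pass counting sort: matching entries are appended to buckets keyed by hit count and the buckets are concatenated in descending score order, which reproduces the stable sort's tie order.
import Mathlib
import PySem

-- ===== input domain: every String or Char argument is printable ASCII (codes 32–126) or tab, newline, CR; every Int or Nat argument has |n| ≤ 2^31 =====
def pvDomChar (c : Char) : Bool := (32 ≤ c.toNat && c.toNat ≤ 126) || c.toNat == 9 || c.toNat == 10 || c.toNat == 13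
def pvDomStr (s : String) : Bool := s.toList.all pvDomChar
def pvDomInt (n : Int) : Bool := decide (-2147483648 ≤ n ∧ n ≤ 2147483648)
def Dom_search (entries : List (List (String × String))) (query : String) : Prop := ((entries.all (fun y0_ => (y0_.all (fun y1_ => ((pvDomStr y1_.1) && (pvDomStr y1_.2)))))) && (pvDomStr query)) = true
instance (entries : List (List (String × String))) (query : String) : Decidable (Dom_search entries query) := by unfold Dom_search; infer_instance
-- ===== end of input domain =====

-- B replaces A's collect-then-stable-sort by a counting-sort: matching entries are grouped
-- into buckets keyed by hit count in one pass and emitted high-to-low (objective: alternative).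

-- ===== PORT A =====
-- helper `normalize` of the Python module (shared verbatim by A and B)
def pyNormalize (s : String) : String :=
  PySem.Str.strip (PySem.Str.replace (PySem.Str.replace (PySem.Str.lower s) "-" " ") "_" " ")

-- normalize(f"{entry.get('dataset_name','')} {entry.get('description','')}") (identical line in A and B)
def entryText (entry : List (String × String)) : String :=
  pyNormalize (PySem.Str.join " "
    [PySem.Dict.getD (PySem.Dict.mk entry) "dataset_name" "",
     PySem.Dict.getD (PySem.Dict.mk entry) "description" ""])

def search (entries : List (List (String × String))) (query : String) : List (List (String × String)) :=
  let tokens := PySem.Str.split₀ (pyNormalize query)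
  if tokens = [] then entries
  else
    let scored : List (Int × List (String × String)) :=
      entries.foldl (fun acc entry =>
        let text := entryText entry
        let hits : Int := (tokens.map (fun t => if PySem.Str.isIn t text then (1 : Int) else 0)).sum
        if hits > 0 then acc ++ [(hits, entry)] else acc) []
    (PySem.List.sorted scored (fun x => -x.1)).map (fun x => x.2)

-- ===== PORT B =====
def search_alt (entries : List (List (String × String))) (query : String) : List (List (String × String)) :=
  let tokens := PySem.Str.split₀ (pyNormalize query)
  if tokens = [] then entries
  else
    let n : Int := tokens.length
    let buckets : PySem.Dict Int (List (List (String × String))) :=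
      entries.foldl (fun bks entry =>
        let text := entryText entry
        let hits : Int := tokens.foldl (fun h t => if PySem.Str.isIn t text then h + 1 else h) 0
        if hits ≠ 0 then bks.modify hits [] (fun l => l ++ [entry]) else bks) PySem.Dict.empty
    (PySem.List.pyRange n 0 (-1)).foldl (fun acc s => acc ++ buckets.getD s []) []

-- ===== PRECONDITION & SPEC =====
def Spec_search (entries : List (List (String × String))) (query : String) (out : List (List (String × String))) : Prop := out = search_alt entries query
instance (entries : List (List (String × String))) (query : String) (out : List (List (String × String))) : Decidable (Spec_search entries query out) := by unfold Spec_search; infer_instance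

-- ===== CLAIM (what is proved, stated in full; the proofs are below) =====
def Claim_equal_search : Prop := ∀ (entries : List (List (String × String))) (query : String), Dom_search entries query → Spec_search entries query (search entries query)

-- ===== LEMMAS AND PROOFS =====

-- hit count of an entry, the common value of A's sum and B's counting loop
def hitsOf (tokens : List String) (entry : List (String × String)) : Int :=
  (tokens.countP (fun t => PySem.Str.isIn t (entryText entry)) : Int)

theorem insertBy_append_left {α : Type} (before : α → α → Bool) (x : α) (ys zs : List α)
    (h : ∀ y ∈ ys, before x y = false) :
    PySem.List.insertBy before x (ys ++ zs) = ys ++ PySem.List.insertBy before x zs := by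
  induction ys with
  | nil => simp
  | cons y ys ih =>
    simp only [List.cons_append, PySem.List.insertBy, h y (by simp)]
    simp [ih (fun y' hy' => h y' (by simp [hy']))]

theorem insertBy_all_before {α : Type} (before : α → α → Bool) (x : α) (zs : List α)
    (h : ∀ z ∈ zs, before x z = true) :
    PySem.List.insertBy before x zs = x :: zs := by
  cases zs with
  | nil => simp [PySem.List.insertBy]
  | cons z zs => simp [PySem.List.insertBy, h z (by simp)]

theorem flatMap_congr' {α β : Type} (l : List α) (f g : α → List β)
    (h : ∀ a ∈ l, f a = g a) : l.flatMap f = l.flatMap g := by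
  induction l with
  | nil => rfl
  | cons a l ih => simp [List.flatMap_cons, h a (by simp), ih (fun a' ha' => h a' (by simp [ha']))]

theorem insert_bucket {α : Type} (key : α → Int) (x : α) (pre : List α) :
    ∀ (ks : List Int), ks.Pairwise (· < ·) → key x ∈ ks →
    PySem.List.insertBy (fun a b => decide (key a < key b)) x
      (ks.flatMap (fun k => pre.filter (fun y => key y == k)))
    = ks.flatMap (fun k => (pre ++ [x]).filter (fun y => key y == k)) := by
  intro ks
  induction ks with
  | nil => intro _ hx; simp at hx
  | cons k ks ih =>
    intro hp hx
    have hp1 : ∀ k' ∈ ks, k < k' := (List.pairwise_cons.mp hp).1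
    have hp2 : ks.Pairwise (· < ·) := (List.pairwise_cons.mp hp).2
    by_cases hk : key x = k
    · have h1 : ∀ y ∈ pre.filter (fun y => key y == k),
          (fun a b => decide (key a < key b)) x y = false := by
        intro y hy
        have : key y = k := by simpa using (List.of_mem_filter hy)
        simp [this, hk]
      rw [List.flatMap_cons, insertBy_append_left _ _ _ _ h1]
      have h2 : PySem.List.insertBy (fun a b => decide (key a < key b)) x
          (ks.flatMap (fun k' => pre.filter (fun y => key y == k')))
          = x :: ks.flatMap (fun k' => pre.filter (fun y => key y == k')) := by
        apply insertBy_all_before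
        intro z hz
        rcases List.mem_flatMap.mp hz with ⟨k', hk', hzf⟩
        have : key z = k' := by simpa using (List.of_mem_filter hzf)
        simp [this, hk, hp1 k' hk']
      rw [h2, List.flatMap_cons]
      have e1 : (pre ++ [x]).filter (fun y => key y == k) =
          pre.filter (fun y => key y == k) ++ [x] := by
        simp [List.filter_append, hk]
      have e2 : ks.flatMap (fun k' => (pre ++ [x]).filter (fun y => key y == k')) =
          ks.flatMap (fun k' => pre.filter (fun y => key y == k')) := by
        apply flatMap_congr'
        intro k' hk'
        have hne : key x ≠ k' := by have := hp1 k' hk'; omega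
        simp [List.filter_append, hne]
      rw [e1, e2]; simp
    · have hx' : key x ∈ ks := by
        rcases List.mem_cons.mp hx with h | h
        · exact absurd h hk
        · exact h
      have h1 : ∀ y ∈ pre.filter (fun y => key y == k),
          (fun a b => decide (key a < key b)) x y = false := by
        intro y hy
        have hyk : key y = k := by simpa using (List.of_mem_filter hy)
        have : k < key x := hp1 _ hx'
        simp [hyk]; omega
      rw [List.flatMap_cons, insertBy_append_left _ _ _ _ h1, ih hp2 hx', List.flatMap_cons]
      have : (pre ++ [x]).filter (fun y => key y == k) = pre.filter (fun y => key y == k) := by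
        simp [List.filter_append, hk]
      rw [this]

theorem foldl_insert_buckets {α : Type} (key : α → Int) (ks : List Int)
    (hks : ks.Pairwise (· < ·)) :
    ∀ (xs pre : List α), (∀ x ∈ xs, key x ∈ ks) →
    xs.foldl (fun acc x => PySem.List.insertBy (fun a b => decide (key a < key b)) x acc)
      (ks.flatMap (fun k => pre.filter (fun y => key y == k)))
    = ks.flatMap (fun k => (pre ++ xs).filter (fun y => key y == k)) := by
  intro xs
  induction xs with
  | nil => intro pre _; simp
  | cons x xs ih =>
    intro pre h
    rw [List.foldl_cons, insert_bucket key x pre ks hks (h x (by simp)),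
        ih (pre ++ [x]) (fun y hy => h y (by simp [hy]))]
    simp

theorem sorted_buckets {α : Type} (key : α → Int) (ks : List Int)
    (hks : ks.Pairwise (· < ·)) (xs : List α) (h : ∀ x ∈ xs, key x ∈ ks) :
    PySem.List.sorted xs key = ks.flatMap (fun k => xs.filter (fun y => key y == k)) := by
  rw [PySem.List.sorted_eq_foldl_insertBy]
  have hnil : ks.flatMap (fun k => ([] : List α).filter (fun y => key y == k)) = [] := by
    induction ks with
    | nil => rfl
    | cons k ks ih => simp
  have h2 := foldl_insert_buckets key ks hks xs [] h
  simp only [List.nil_append] at h2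
  rw [← hnil, h2]

theorem getD_group {α : Type} (H : α → Int) :
    ∀ (xs : List α) (d : PySem.Dict Int (List α)) (s : Int),
    (xs.foldl (fun bks e => if H e ≠ 0 then bks.modify (H e) [] (fun l => l ++ [e]) else bks) d).getD s []
    = d.getD s [] ++ xs.filter (fun e => decide (H e ≠ 0) && (H e == s)) := by
  intro xs
  induction xs with
  | nil => intro d s; simp
  | cons e xs ih =>
    intro d s
    by_cases h : H e = 0
    · rw [List.foldl_cons, if_neg (by simp [h]), ih]
      simp [h]
    · rw [List.foldl_cons, if_pos h, ih]
      rw [PySem.Dict.modify, PySem.Dict.getD_insert]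
      by_cases hs : s = H e
      · simp [hs, h]
      · have : ¬ (H e == s) = true := by simp; omega
        simp [hs, h, this]

theorem search_eq_flatMap (entries : List (List (String × String))) (query : String)
    (tokens : List String) (ht : tokens = PySem.Str.split₀ (pyNormalize query))
    (hne : ¬ tokens = []) :
    search entries query =
      (PySem.List.pyRange (tokens.length : Int) 0 (-1)).flatMap
        (fun s => (entries.filter
          (fun e => decide (0 < hitsOf tokens e) && (hitsOf tokens e == s))).map (fun e => e)) := by
  unfold search
  rw [← ht, if_neg hne]
  simp only [PySem.List.sum_map_ite_one_zero]
  rw [show (fun (acc : List (Int × List (String × String))) entry =>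
      if 0 < ((tokens.countP fun t => PySem.Str.isIn t (entryText entry) : Nat) : Int) then
        acc ++ [(((tokens.countP fun t => PySem.Str.isIn t (entryText entry) : Nat) : Int), entry)]
      else acc)
    = (fun acc entry => if 0 < hitsOf tokens entry then acc ++ [(hitsOf tokens entry, entry)] else acc)
    from rfl]
  rw [PySem.List.foldl_append_ite (fun e => 0 < hitsOf tokens e) (fun e => (hitsOf tokens e, e))]
  rw [sorted_buckets (fun x : Int × List (String × String) => -x.1)
        ((PySem.List.pyRange (tokens.length : Int) 0 (-1)).map (fun s => -s))
        (by
          rw [List.pairwise_map]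
          have : (PySem.List.pyRange (tokens.length : Int) 0 (-1)).Pairwise (· > ·) := by
            rw [PySem.List.pyRange_neg_one_eq_reverse, List.pairwise_reverse]
            exact (PySem.List.pairwise_lt_pyRange_one 1 ((tokens.length : Int) + 1)).imp
              (fun h => h)
          exact this.imp (fun h => by omega))
        _
        (by
          intro x hx
          simp only [List.nil_append, List.mem_map, List.mem_filter] at hx
          rcases hx with ⟨e, ⟨_, hpos⟩, rfl⟩
          simp only [List.mem_map]
          refine ⟨hitsOf tokens e, ?_, rfl⟩
          rw [PySem.List.mem_pyRange_neg_one]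
          have h1 : 0 < hitsOf tokens e := by simpa using hpos
          have h2 : hitsOf tokens e ≤ (tokens.length : Int) := by
            unfold hitsOf
            exact_mod_cast List.countP_le_length
          exact ⟨h1, h2⟩)]
  rw [List.flatMap_map, List.map_flatMap]
  apply flatMap_congr'
  intro s _
  rw [List.nil_append, List.filter_map, List.map_map]
  have : ((fun (y : Int × List (String × String)) => -y.1 == -s) ∘ fun e => (hitsOf tokens e, e))
      = fun e => (hitsOf tokens e == s) := by
    funext e
    simp only [Function.comp]
    by_cases h : hitsOf tokens e = s <;> simp [h]
  rw [this, List.filter_filter]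
  rw [List.filter_congr (fun a (_ : a ∈ entries) => Bool.and_comm (hitsOf tokens a == s) (decide (0 < hitsOf tokens a)))]
  rfl

theorem search_alt_eq_flatMap (entries : List (List (String × String))) (query : String)
    (tokens : List String) (ht : tokens = PySem.Str.split₀ (pyNormalize query))
    (hne : ¬ tokens = []) :
    search_alt entries query =
      (PySem.List.pyRange (tokens.length : Int) 0 (-1)).flatMap
        (fun s => entries.filter
          (fun e => decide (hitsOf tokens e ≠ 0) && (hitsOf tokens e == s))) := by
  unfold search_alt
  rw [← ht, if_neg hne]
  simp only [PySem.List.foldl_count_if, zero_add]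
  rw [PySem.List.foldl_append_eq_flatMap]
  rw [List.nil_append]
  apply flatMap_congr'
  intro s _
  rw [show (fun (bks : PySem.Dict Int (List (List (String × String)))) entry =>
      if ((tokens.countP fun t => PySem.Str.isIn t (entryText entry) : Nat) : Int) ≠ 0 then
        bks.modify ((tokens.countP fun t => PySem.Str.isIn t (entryText entry) : Nat) : Int) []
          (fun l => l ++ [entry])
      else bks)
    = (fun bks e => if hitsOf tokens e ≠ 0 then bks.modify (hitsOf tokens e) [] (fun l => l ++ [e]) else bks)
    from rfl]
  rw [getD_group (hitsOf tokens) entries PySem.Dict.empty s]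
  simp [PySem.Dict.empty, PySem.Dict.getD, PySem.Dict.get?]

-- ===== VERDICT (by name: the statement is the Claim_ definition above) =====
theorem search_spec : Claim_equal_search := by
  intro entries query _
  show search entries query = search_alt entries query
  by_cases hne : PySem.Str.split₀ (pyNormalize query) = []
  · unfold search search_alt
    simp [hne]
  · rw [search_eq_flatMap entries query _ rfl hne,
        search_alt_eq_flatMap entries query _ rfl hne]
    apply flatMap_congr'
    intro s _
    rw [List.map_id']
    apply List.filter_congr
    intro e _
    have h0 : 0 ≤ hitsOf (PySem.Str.split₀ (pyNormalize query)) e := by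
      unfold hitsOf; positivity
    by_cases h : hitsOf (PySem.Str.split₀ (pyNormalize query)) e = 0
    · simp [h]
    · simp [h]; omega
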